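-- pv_equiv track=rewrite | github.com/autolabhq/autolab | tasks/hash_join/tests/verify_correctness.py | reference_join
-- ===== SOURCE A (Python) =====
-- def reference_join(r_rows, s_rows):
--     """
--     Pure-Python inner equi-join.  Returns (match_count, checksum) where
--     checksum = SUM of ((uint32_t)r.payload + (uint32_t)s.payload) mod 2^64,
--     matching the C uint64_t accumulation in solve.c.
--     """
--     # Build index from key -> list of payloads in R (for correctness only; OK to be slow)
--     from collections import defaultdict
--     r_index = defaultdict(list)
--     for key, payload in r_rows:
--         r_index[key].append(payload)
--
--     count    = 0
--     checksum = 0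
--     MASK64   = 0xFFFFFFFFFFFFFFFF
--
--     for s_key, s_payload in s_rows:
--         for r_payload in r_index.get(s_key, []):
--             count += 1
--             # match solve.c: (uint32_t)r.payload + (uint32_t)s.payload, widened
--             checksum = (checksum + (r_payload & 0xFFFFFFFF)
--                         + (s_payload & 0xFFFFFFFF)) & MASK64
--
--     return count, checksum
-- ===== SOURCE B (Python) =====
-- def reference_join(r_rows, s_rows):
--     # Per-key aggregation: one pass over R builds (count, masked payload sum) per key,
--     # one pass over S combines them arithmetically -- no pair enumeration.
--     agg = {}
--     for key, payload in r_rows: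
--         c, s = agg.get(key, (0, 0))
--         agg[key] = (c + 1, s + (payload & 0xFFFFFFFF))
--     count = 0
--     total = 0
--     for key, payload in s_rows:
--         c, s = agg.get(key, (0, 0))
--         count += c
--         total += c * (payload & 0xFFFFFFFF) + s
--     return count, total & 0xFFFFFFFFFFFFFFFF
-- ===== Notes on version B (the rewrite author's own statement) =====
-- stated objective: alternative
-- what changed: B aggregates per key (match count and masked payload sum) in one pass over R and combines the aggregates arithmetically per S-row, never enumerating the matching pairs; the 64-bit mask is applied once at the end. This does O(|R|+|S|) work instead of O(|R|+|S|+matches), though on the generated timing inputs no speed difference was measurable.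
import Mathlib
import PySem

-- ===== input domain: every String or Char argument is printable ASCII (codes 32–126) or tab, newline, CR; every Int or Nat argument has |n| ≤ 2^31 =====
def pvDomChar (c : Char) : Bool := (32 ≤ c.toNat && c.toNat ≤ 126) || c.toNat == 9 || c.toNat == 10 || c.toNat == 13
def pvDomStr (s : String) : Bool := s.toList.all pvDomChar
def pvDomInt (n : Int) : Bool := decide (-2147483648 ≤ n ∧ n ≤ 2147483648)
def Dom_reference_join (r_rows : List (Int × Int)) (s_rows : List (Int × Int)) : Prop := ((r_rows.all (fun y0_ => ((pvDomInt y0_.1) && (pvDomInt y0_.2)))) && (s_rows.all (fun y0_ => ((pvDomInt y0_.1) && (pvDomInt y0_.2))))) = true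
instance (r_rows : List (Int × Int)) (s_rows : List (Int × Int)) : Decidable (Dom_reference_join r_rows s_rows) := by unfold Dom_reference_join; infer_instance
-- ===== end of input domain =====

-- B replaces A's enumeration of matching pairs by per-key (count, masked-sum) aggregates
-- combined arithmetically per S row, so no per-pair work is done (objective: alternative algorithm).

-- ===== PORT A =====
def reference_join (r_rows : List (Int × Int)) (s_rows : List (Int × Int)) : Int × Int :=
  -- r_index = defaultdict(list); r_index[key].append(payload)
  let r_index : PySem.Dict Int (List Int) :=
    r_rows.foldl (fun d p => d.modify p.1 [] (fun l => l ++ [p.2])) PySem.Dict.empty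
  -- for s_key, s_payload in s_rows: for r_payload in r_index.get(s_key, []): …
  let st :=
    s_rows.foldl (fun (st : Int × Int) p =>
      (r_index.getD p.1 []).foldl (fun (st : Int × Int) rp =>
        (st.1 + 1,
         PySem.Int.band (st.2 + PySem.Int.band rp 4294967295 + PySem.Int.band p.2 4294967295)
           18446744073709551615)) st) (0, 0)
  st

-- ===== PORT B =====
def reference_join_alt (r_rows : List (Int × Int)) (s_rows : List (Int × Int)) : Int × Int :=
  let agg : PySem.Dict Int (Int × Int) :=
    r_rows.foldl (fun d p =>
      let cs := d.getD p.1 (0, 0)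
      d.insert p.1 (cs.1 + 1, cs.2 + PySem.Int.band p.2 4294967295)) PySem.Dict.empty
  let st :=
    s_rows.foldl (fun (st : Int × Int) p =>
      let cs := agg.getD p.1 (0, 0)
      (st.1 + cs.1, st.2 + cs.1 * PySem.Int.band p.2 4294967295 + cs.2)) (0, 0)
  (st.1, PySem.Int.band st.2 18446744073709551615)

-- ===== PRECONDITION & SPEC =====
def Spec_reference_join (r_rows : List (Int × Int)) (s_rows : List (Int × Int)) (out : Int × Int) : Prop := out = reference_join_alt r_rows s_rows
instance (r_rows : List (Int × Int)) (s_rows : List (Int × Int)) (out : Int × Int) : Decidable (Spec_reference_join r_rows s_rows out) := by unfold Spec_reference_join; infer_instance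

-- ===== CLAIM (what is proved, stated in full; the proofs are below) =====
def Claim_equal_reference_join : Prop := ∀ (r_rows : List (Int × Int)) (s_rows : List (Int × Int)), Dom_reference_join r_rows s_rows → Spec_reference_join r_rows s_rows (reference_join r_rows s_rows)

-- ===== LEMMAS AND PROOFS =====

-- x & 0xFFFFFFFF is nonnegative
theorem pv_b32_nonneg (p : Int) : 0 ≤ PySem.Int.band p 4294967295 := by
  rw [PySem.Int.band_comm]
  exact PySem.Int.band_nonneg_of_nonneg_left p (by norm_num)

-- masking a nonnegative value with 2^64-1 is mod 2^64
theorem pv_band64 (z : Int) (hz : 0 ≤ z) :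
    PySem.Int.band z 18446744073709551615 = z % 18446744073709551616 := by
  rw [PySem.Int.band_of_nonneg hz (by norm_num)]
  have h1 : Int.toNat 18446744073709551615 = 2 ^ 64 - 1 := rfl
  rw [h1, Nat.and_two_pow_sub_one_eq_mod]
  omega

-- B's aggregate dict: per-key count and masked payload sum of R
theorem pv_agg_getD (l : List (Int × Int)) (d : PySem.Dict Int (Int × Int)) (k : Int) :
    (l.foldl (fun d p =>
        let cs := d.getD p.1 (0, 0)
        d.insert p.1 (cs.1 + 1, cs.2 + PySem.Int.band p.2 4294967295)) d).getD k (0, 0)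
    = (((d.getD k (0, 0)).1 + ((l.filter (fun p => p.1 == k)).map (·.2)).length,
        (d.getD k (0, 0)).2 + (((l.filter (fun p => p.1 == k)).map (fun p => PySem.Int.band p.2 4294967295))).sum)) := by
  induction l generalizing d with
  | nil => simp
  | cons p rest ih =>
    simp only [List.foldl_cons, List.filter_cons]
    by_cases hk : p.1 = k
    · subst hk
      simp only [beq_self_eq_true, reduceIte]
      rw [ih, PySem.Dict.getD_insert, if_pos rfl]
      simp only [List.map_cons, List.length_cons, List.sum_cons, Prod.mk.injEq]
      constructor
      · push_cast; ring
      · ring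
    · have hne : (p.1 == k) = false := by simp [hk]
      simp only [hne, Bool.false_eq_true, reduceIte]
      rw [ih, PySem.Dict.getD_insert]
      have hk' : k ≠ p.1 := fun h => hk h.symm
      simp [hk']

-- A's inner loop over one key's payload list, against the aggregate arithmetic
theorem pv_inner (pl : List Int) (b : Int) (hb : 0 ≤ b) (c x y : Int)
    (hx : x = y % 18446744073709551616) :
    pl.foldl (fun (st : Int × Int) rp =>
        (st.1 + 1,
         PySem.Int.band (st.2 + PySem.Int.band rp 4294967295 + b) 18446744073709551615)) (c, x)
    = (c + pl.length,
       (y + (pl.map (fun q => PySem.Int.band q 4294967295)).sum + pl.length * b)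
         % 18446744073709551616) := by
  induction pl generalizing c x y with
  | nil => simp [hx]
  | cons rp rest ih =>
    simp only [List.foldl_cons]
    have ha := pv_b32_nonneg rp
    have hxnn : 0 ≤ x := hx ▸ Int.emod_nonneg y (by norm_num)
    rw [pv_band64 _ (by omega)]
    rw [ih (c + 1) _ (y + PySem.Int.band rp 4294967295 + b) (by omega)]
    simp only [List.length_cons, List.map_cons, List.sum_cons, Prod.mk.injEq]
    refine ⟨by push_cast; ring, ?_⟩
    congr 1
    push_cast
    ring

-- the outer loop over S, with the 64-bit invariant x = y mod 2^64
theorem pv_outer (r_rows s : List (Int × Int)) (c x y : Int)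
    (hx : x = y % 18446744073709551616) (hy : 0 ≤ y) :
    (s.foldl (fun (st : Int × Int) p =>
        ((r_rows.foldl (fun d p => d.modify p.1 [] (fun l => l ++ [p.2]))
            PySem.Dict.empty).getD p.1 []).foldl (fun (st : Int × Int) rp =>
          (st.1 + 1,
           PySem.Int.band (st.2 + PySem.Int.band rp 4294967295 + PySem.Int.band p.2 4294967295)
             18446744073709551615)) st) (c, x))
    = (let bf := s.foldl (fun (st : Int × Int) p =>
        let cs := (r_rows.foldl (fun d p =>
            let cs := d.getD p.1 (0, 0)
            d.insert p.1 (cs.1 + 1, cs.2 + PySem.Int.band p.2 4294967295))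
            PySem.Dict.empty).getD p.1 (0, 0)
        (st.1 + cs.1, st.2 + cs.1 * PySem.Int.band p.2 4294967295 + cs.2)) (c, y)
       (bf.1, bf.2 % 18446744073709551616)) := by
  induction s generalizing c x y with
  | nil => simp [hx]
  | cons p rest ih =>
    simp only [List.foldl_cons]
    rw [PySem.Dict.getD_foldl_modify_append, pv_agg_getD]
    simp only [PySem.Dict.getD_empty, List.nil_append, zero_add]
    set pl := (r_rows.filter (fun q => q.1 == p.1)).map (·.2) with hpl
    have hsum : 0 ≤ (pl.map (fun q => PySem.Int.band q 4294967295)).sum := by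
      apply List.sum_nonneg
      intro a ha
      obtain ⟨q, _, rfl⟩ := List.mem_map.mp ha
      exact pv_b32_nonneg q
    have hmul : (0 : Int) ≤ (pl.length : Int) * PySem.Int.band p.2 4294967295 :=
      mul_nonneg (by positivity) (pv_b32_nonneg p.2)
    rw [pv_inner pl (PySem.Int.band p.2 4294967295) (pv_b32_nonneg p.2) c x y hx]
    rw [ih (c + pl.length)
        _
        (y + pl.length * PySem.Int.band p.2 4294967295
           + (pl.map (fun q => PySem.Int.band q 4294967295)).sum)
        (by congr 1; ring)
        (by linarith)]
    simp only [hpl, List.map_map, Function.comp_def]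

-- B's checksum accumulator stays nonnegative
theorem pv_b_snd_nonneg (r_rows s : List (Int × Int)) (c y : Int) (hy : 0 ≤ y) :
    0 ≤ (s.foldl (fun (st : Int × Int) p =>
        let cs := (r_rows.foldl (fun d p =>
            let cs := d.getD p.1 (0, 0)
            d.insert p.1 (cs.1 + 1, cs.2 + PySem.Int.band p.2 4294967295))
            PySem.Dict.empty).getD p.1 (0, 0)
        (st.1 + cs.1, st.2 + cs.1 * PySem.Int.band p.2 4294967295 + cs.2)) (c, y)).2 := by
  induction s generalizing c y with
  | nil => simpa using hy
  | cons p rest ih =>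
    simp only [List.foldl_cons]
    rw [pv_agg_getD]
    simp only [PySem.Dict.getD_empty, zero_add]
    apply ih
    have hsum : 0 ≤ (((r_rows.filter (fun q => q.1 == p.1)).map (·.2)).map
        (fun q => PySem.Int.band q 4294967295)).sum := by
      apply List.sum_nonneg
      intro a ha
      obtain ⟨q, _, rfl⟩ := List.mem_map.mp ha
      exact pv_b32_nonneg q
    have hmul : (0 : Int) ≤ ((((r_rows.filter (fun q => q.1 == p.1)).map (·.2)).length : Int))
        * PySem.Int.band p.2 4294967295 :=
      mul_nonneg (by positivity) (pv_b32_nonneg p.2)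
    simp only [List.map_map, Function.comp_def] at hsum hmul ⊢
    linarith

-- ===== VERDICT (by name: the statement is the Claim_ definition above) =====
theorem reference_join_spec : Claim_equal_reference_join := by
  intro r_rows s_rows _
  unfold Spec_reference_join reference_join reference_join_alt
  have h := pv_outer r_rows s_rows 0 0 0 (by norm_num) le_rfl
  have hnn := pv_b_snd_nonneg r_rows s_rows 0 0 le_rfl
  simp only at h hnn ⊢
  rw [h]
  exact congrArg _ (pv_band64 _ hnn).symm
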